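-- pv_equiv track=rewrite | github.com/Ryujiyasu/niobi | quantum/scale_benchmark.py | solve_greedy
-- ===== SOURCE A (Python) =====
-- def solve_greedy(scores):
--     nd, nr = len(scores), len(scores[0])
--     cands = [(d, r, scores[d][r]) for d in range(nd) for r in range(nr) if scores[d][r] > 0]
--     cands.sort(key=lambda x: -x[2])
--     md, mr = set(), set()
--     result = []
--     for d, r, s in cands:
--         if d not in md and r not in mr:
--             md.add(d); mr.add(r)
--             result.append((d, r, s))
--     return result
-- ===== SOURCE B (Python) =====
-- def solve_greedy(scores):
--     nd, nr = len(scores), len(scores[0])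
--     cands = [(d, r, scores[d][r]) for d in range(nd) for r in range(nr) if scores[d][r] > 0]
--     result = []
--     while cands:
--         d, r, s = max(cands, key=lambda x: x[2])
--         result.append((d, r, s))
--         cands = [c for c in cands if c[0] != d and c[1] != r]
--     return result
-- ===== Notes on version B (the rewrite author's own statement) =====
-- stated objective: alternative
-- what changed: A sorts all positive candidates descending and scans once with row/column sets; B never sorts: it repeatedly extracts the first maximum-score candidate with max() and filters out every candidate sharing its row or column.
import Mathlib
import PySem

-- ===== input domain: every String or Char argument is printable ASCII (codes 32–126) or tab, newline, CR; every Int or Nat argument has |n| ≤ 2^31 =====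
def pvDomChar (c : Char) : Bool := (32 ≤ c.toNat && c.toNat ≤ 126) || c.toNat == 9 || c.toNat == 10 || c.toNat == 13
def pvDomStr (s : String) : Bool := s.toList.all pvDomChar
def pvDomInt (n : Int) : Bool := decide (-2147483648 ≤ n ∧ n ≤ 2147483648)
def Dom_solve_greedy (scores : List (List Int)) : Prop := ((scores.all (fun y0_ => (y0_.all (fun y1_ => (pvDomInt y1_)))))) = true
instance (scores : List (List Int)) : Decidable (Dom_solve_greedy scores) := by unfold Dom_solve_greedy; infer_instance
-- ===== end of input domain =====

-- B replaces A's sort-then-scan-with-sets by repeated extraction of the first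
-- maximum-score candidate followed by filtering out the candidates that share
-- its row or column (objective: alternative — no sort, no sets).

-- ===== PORT A =====
def solve_greedy (scores : List (List Int)) : List (Int × Int × Int) :=
  let nd := PySem.List.len scores
  let nr := PySem.List.len (PySem.List.pyGetD scores 0 [])
  let cands : List (Int × Int × Int) :=
    (PySem.List.pyRange 0 nd 1).flatMap (fun d =>
      (PySem.List.pyRange 0 nr 1).filterMap (fun r =>
        if PySem.List.pyGetD (PySem.List.pyGetD scores d []) r 0 > 0 then
          some (d, r, PySem.List.pyGetD (PySem.List.pyGetD scores d []) r 0)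
        else none))
  let sortedCands := PySem.List.sorted cands (fun x => -x.2.2)
  let st := sortedCands.foldl
    (fun (st : PySem.Set Int × PySem.Set Int × List (Int × Int × Int)) c =>
      let md := st.1; let mr := st.2.1; let result := st.2.2
      if !(PySem.Set.contains md c.1) && !(PySem.Set.contains mr c.2.1) then
        (PySem.Set.add md c.1, PySem.Set.add mr c.2.1, result ++ [c])
      else (md, mr, result))
    (PySem.Set.empty, PySem.Set.empty, [])
  st.2.2

-- ===== PORT B =====
-- termination helper for selGreedy (cited by its decreasing_by)
theorem length_filter_lt_of_mem_neg {α : Type} (l : List α) (p : α → Bool) (c : α)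
    (hc : c ∈ l) (hp : p c = false) : (l.filter p).length < l.length := by
  have h1 : (l.filter p).length ≤ l.length := l.length_filter_le _
  rcases Nat.lt_or_ge (l.filter p).length l.length with hlt | hge
  · exact hlt
  · have := List.length_filter_eq_length_iff.mp (le_antisymm h1 hge) c hc
    rw [hp] at this; exact absurd this (by simp)

-- the while-loop of Source B: take the first maximum-score candidate, keep it,
-- drop every candidate sharing its row or column, repeat until empty
def selGreedy (cands : List (Int × Int × Int)) : List (Int × Int × Int) :=
  match h : PySem.List.max? cands (fun x => x.2.2) with
  | none => []
  | some c =>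
      c :: selGreedy (cands.filter (fun x => x.1 != c.1 && x.2.1 != c.2.1))
termination_by cands.length
decreasing_by
  rw [List.unattach_filter (g := fun x => x.1 != c.1 && x.2.1 != c.2.1) (hf := fun x h => rfl),
    List.unattach_attach]
  exact length_filter_lt_of_mem_neg _ _ c (PySem.List.max?_mem h) (by simp)

def solve_greedy_alt (scores : List (List Int)) : List (Int × Int × Int) :=
  let nd := PySem.List.len scores
  let nr := PySem.List.len (PySem.List.pyGetD scores 0 [])
  let cands : List (Int × Int × Int) :=
    (PySem.List.pyRange 0 nd 1).flatMap (fun d =>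
      (PySem.List.pyRange 0 nr 1).filterMap (fun r =>
        if PySem.List.pyGetD (PySem.List.pyGetD scores d []) r 0 > 0 then
          some (d, r, PySem.List.pyGetD (PySem.List.pyGetD scores d []) r 0)
        else none))
  selGreedy cands

-- ===== PRECONDITION & SPEC =====
-- Pre_ excludes exactly the inputs on which Python A raises IndexError:
-- empty scores (scores[0]) and rows shorter than the first row (scores[d][r]).
def Pre_solve_greedy (scores : List (List Int)) : Prop :=
  scores ≠ [] ∧ ∀ row ∈ scores, scores.headI.length ≤ row.length
instance (scores : List (List Int)) : Decidable (Pre_solve_greedy scores) := by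
  unfold Pre_solve_greedy; infer_instance
def pvWitness_solve_greedy : List (List Int) := [[1, 2], [3, 0]]
def Spec_solve_greedy (scores : List (List Int)) (out : List (Int × Int × Int)) : Prop := out = solve_greedy_alt scores
instance (scores : List (List Int)) (out : List (Int × Int × Int)) : Decidable (Spec_solve_greedy scores out) := by unfold Spec_solve_greedy; infer_instance

-- ===== CLAIM (what is proved, stated in full; the proofs are below) =====
def Claim_equal_solve_greedy : Prop := ∀ (scores : List (List Int)), Dom_solve_greedy scores → Pre_solve_greedy scores → Spec_solve_greedy scores (solve_greedy scores)

-- ===== LEMMAS AND PROOFS =====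

-- A's acceptance test, as the Bool predicate of its loop
def okB (md mr : PySem.Set Int) (x : Int × Int × Int) : Bool :=
  !(PySem.Set.contains md x.1) && !(PySem.Set.contains mr x.2.1)

-- the structural form of A's greedy loop
def gA : List (Int × Int × Int) → PySem.Set Int → PySem.Set Int → List (Int × Int × Int)
  | [], _, _ => []
  | c :: L, md, mr =>
      if okB md mr c then
        c :: gA L (PySem.Set.add md c.1) (PySem.Set.add mr c.2.1)
      else gA L md mr

theorem selGreedy_eq (cands : List (Int × Int × Int)) :
    selGreedy cands =
      match PySem.List.max? cands (fun x => x.2.2) with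
      | none => []
      | some c => c :: selGreedy (cands.filter (fun x => x.1 != c.1 && x.2.1 != c.2.1)) := by
  rw [selGreedy]
  rcases h : PySem.List.max? cands (fun x => x.2.2) with _ | c <;> simp

theorem foldl_eq_gA (L : List (Int × Int × Int)) (md mr : PySem.Set Int)
    (res : List (Int × Int × Int)) :
    (L.foldl
      (fun (st : PySem.Set Int × PySem.Set Int × List (Int × Int × Int)) c =>
        let md := st.1; let mr := st.2.1; let result := st.2.2
        if !(PySem.Set.contains md c.1) && !(PySem.Set.contains mr c.2.1) then
          (PySem.Set.add md c.1, PySem.Set.add mr c.2.1, result ++ [c])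
        else (md, mr, result))
      (md, mr, res)).2.2 = res ++ gA L md mr := by
  induction L generalizing md mr res with
  | nil => simp [gA]
  | cons c L ih =>
      simp only [List.foldl_cons, gA, okB]
      by_cases h : (!(PySem.Set.contains md c.1) && !(PySem.Set.contains mr c.2.1)) = true
      · rw [if_pos h, if_pos h]
        rw [ih]
        simp
      · rw [if_neg h, if_neg h]
        exact ih md mr res

theorem insertBy_all_before {α : Type} (bef : α → α → Bool) (x : α) (l : List α)
    (h : ∀ z ∈ l, bef x z = true) : PySem.List.insertBy bef x l = x :: l := by
  cases l with
  | nil => rfl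
  | cons z t => simp [PySem.List.insertBy, h z (by simp)]

theorem filter_insertBy_neg {α : Type} (bef : α → α → Bool) (p : α → Bool) (x : α)
    (ys : List α) (hx : p x = false) :
    (PySem.List.insertBy bef x ys).filter p = ys.filter p := by
  induction ys with
  | nil => simp [PySem.List.insertBy, hx]
  | cons y t ih =>
      simp only [PySem.List.insertBy]
      by_cases hb : bef x y = true
      · simp [hb, List.filter_cons, hx]
      · by_cases hy : p y = true <;> simp [hb, hy, ih]

theorem filter_insertBy_pos (key : Int × Int × Int → Int) (p : Int × Int × Int → Bool)
    (x : Int × Int × Int) (ys : List (Int × Int × Int))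
    (hys : ys.Pairwise (fun a b => key a ≤ key b)) (hx : p x = true) :
    (PySem.List.insertBy (fun a b => decide (key a < key b)) x ys).filter p =
      PySem.List.insertBy (fun a b => decide (key a < key b)) x (ys.filter p) := by
  induction ys with
  | nil => simp [PySem.List.insertBy, hx]
  | cons y t ih =>
      rcases List.pairwise_cons.mp hys with ⟨hy, ht⟩
      by_cases hxy : key x < key y
      · have hins : PySem.List.insertBy (fun a b => decide (key a < key b)) x (y :: t) =
            x :: y :: t := by simp [PySem.List.insertBy, hxy]
        rw [hins]
        by_cases hpy : p y = true
        · simp [hx, hpy, PySem.List.insertBy, hxy]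
        · simp only [List.filter_cons, hx, hpy, if_pos, Bool.false_eq_true, if_false]
          rw [insertBy_all_before]
          intro z hz
          have hzt : z ∈ t := List.mem_of_mem_filter hz
          simpa using lt_of_lt_of_le hxy (hy z hzt)
      · have hins : PySem.List.insertBy (fun a b => decide (key a < key b)) x (y :: t) =
            y :: PySem.List.insertBy (fun a b => decide (key a < key b)) x t := by
          simp [PySem.List.insertBy, hxy]
        rw [hins]
        by_cases hpy : p y = true
        · simp [hpy, ih ht, PySem.List.insertBy, hxy]
        · simp [hpy, ih ht]

theorem sorted_append_singleton (xs : List (Int × Int × Int)) (x : Int × Int × Int)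
    (key : Int × Int × Int → Int) :
    PySem.List.sorted (xs ++ [x]) key =
      PySem.List.insertBy (fun a b => decide (key a < key b)) x (PySem.List.sorted xs key) := by
  rw [PySem.List.sorted_eq_foldl_insertBy, PySem.List.sorted_eq_foldl_insertBy, List.foldl_append,
    List.foldl_cons, List.foldl_nil]

theorem filter_sorted (key : Int × Int × Int → Int) (p : Int × Int × Int → Bool)
    (xs : List (Int × Int × Int)) :
    (PySem.List.sorted xs key).filter p = PySem.List.sorted (xs.filter p) key := by
  induction xs using List.reverseRecOn with
  | nil => rfl
  | append_singleton xs x ih =>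
      rw [sorted_append_singleton, List.filter_append]
      by_cases hx : p x = true
      · rw [filter_insertBy_pos key p x _ (PySem.List.sorted_pairwise xs key) hx, ih,
          show List.filter p [x] = [x] from by simp [hx], sorted_append_singleton]
      · rw [filter_insertBy_neg _ p x _ (by simpa using hx), ih]
        simp [hx]

theorem max?_append_singleton (xs : List (Int × Int × Int)) (x : Int × Int × Int)
    (key : Int × Int × Int → Int) :
    PySem.List.max? (xs ++ [x]) key =
      match PySem.List.max? xs key with
      | none => some x
      | some m => if key m < key x then some x else some m := by
  rcases hm : PySem.List.max? xs key with _ | m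
  · have hxs : xs = [] := (PySem.List.max?_eq_none_iff _ _).mp hm
    subst hxs; rfl
  · unfold PySem.List.max? at hm ⊢
    rw [List.foldl_append, List.foldl_cons, List.foldl_nil, hm]

theorem max?_eq_head_sorted (xs : List (Int × Int × Int)) :
    PySem.List.max? xs (fun x => x.2.2) = (PySem.List.sorted xs (fun x => -x.2.2)).head? := by
  induction xs using List.reverseRecOn with
  | nil => rfl
  | append_singleton xs x ih =>
      rw [max?_append_singleton, sorted_append_singleton, ih]
      rcases hs : PySem.List.sorted xs (fun x => -x.2.2) with _ | ⟨c, t⟩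
      · rfl
      · by_cases h2 : c.2.2 < x.2.2
        · simp [PySem.List.insertBy, show (-x.2.2 : Int) < -c.2.2 from by omega, h2]
        · simp [PySem.List.insertBy, show ¬ (-x.2.2 : Int) < -c.2.2 from by omega, h2]

theorem max?_cons_of_not_lt (c : Int × Int × Int) (t : List (Int × Int × Int))
    (key : Int × Int × Int → Int) (h : ∀ y ∈ t, ¬ key c < key y) :
    PySem.List.max? (c :: t) key = some c := by
  induction t using List.reverseRecOn with
  | nil => rfl
  | append_singleton t y ih =>
      have hy : ¬ key c < key y := h y (by simp)
      have ih' := ih (fun z hz => h z (by simp [hz]))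
      rw [show c :: (t ++ [y]) = (c :: t) ++ [y] from rfl, max?_append_singleton, ih']
      simp [hy]

theorem okB_iff (md mr : PySem.Set Int) (x : Int × Int × Int) :
    okB md mr x = true ↔ x.1 ∉ md ∧ x.2.1 ∉ mr := by
  simp only [okB, Bool.and_eq_true, Bool.not_eq_true', Bool.eq_false_iff, ne_eq,
    PySem.Set.contains_iff]

theorem okB_mono_add (md mr : PySem.Set Int) (a b : Int) (x : Int × Int × Int)
    (h : okB (PySem.Set.add md a) (PySem.Set.add mr b) x = true) : okB md mr x = true := by
  rw [okB_iff] at h ⊢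
  rw [PySem.Set.mem_add, PySem.Set.mem_add] at h
  exact ⟨fun hm => h.1 (Or.inl hm), fun hm => h.2 (Or.inl hm)⟩

theorem gA_filter (L : List (Int × Int × Int)) (q : Int × Int × Int → Bool)
    (md mr : PySem.Set Int)
    (h : ∀ x ∈ L, q x = false → okB md mr x = false) :
    gA L md mr = gA (L.filter q) md mr := by
  induction L generalizing md mr with
  | nil => rfl
  | cons c L ih =>
      by_cases hq : q c = true
      · rw [List.filter_cons, if_pos hq]
        simp only [gA]
        by_cases hc : okB md mr c = true
        · rw [if_pos hc, if_pos hc]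
          congr 1
          apply ih
          intro x hx hqx
          have h0 := h x (by simp [hx]) hqx
          rcases Bool.eq_false_or_eq_true (okB (PySem.Set.add md c.1) (PySem.Set.add mr c.2.1) x)
            with h1 | h1
          · rw [okB_mono_add md mr c.1 c.2.1 x h1] at h0; exact absurd h0 (by simp)
          · exact h1
        · rw [if_neg hc, if_neg hc]
          exact ih md mr (fun x hx hqx => h x (by simp [hx]) hqx)
      · rw [List.filter_cons, if_neg (by simpa using hq)]
        have hc : okB md mr c = false := h c (by simp) (by simpa using hq)
        simp only [gA, hc, Bool.false_eq_true, if_false]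
        exact ih md mr (fun x hx hqx => h x (by simp [hx]) hqx)

theorem gA_eq_selGreedy (n : Nat) (L : List (Int × Int × Int)) (md mr : PySem.Set Int)
    (hn : L.length ≤ n) (hpair : L.Pairwise (fun a b => b.2.2 ≤ a.2.2))
    (hok : ∀ x ∈ L, okB md mr x = true) : gA L md mr = selGreedy L := by
  induction n generalizing L md mr with
  | zero =>
      have hL : L = [] := List.eq_nil_of_length_eq_zero (Nat.le_zero.mp hn)
      subst hL; rw [selGreedy_eq]; rfl
  | succ n ih =>
      cases L with
      | nil => rw [selGreedy_eq]; rfl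
      | cons c L' =>
          have hokc : okB md mr c = true := hok c (by simp)
          rcases List.pairwise_cons.mp hpair with ⟨hc, hp'⟩
          have hmax : PySem.List.max? (c :: L') (fun x => x.2.2) = some c :=
            max?_cons_of_not_lt c L' _ (fun y hy => by have := hc y hy; omega)
          rw [selGreedy_eq, hmax]
          simp only [gA, hokc, if_pos]
          have hfil : (c :: L').filter (fun x => x.1 != c.1 && x.2.1 != c.2.1) =
              L'.filter (fun x => x.1 != c.1 && x.2.1 != c.2.1) := by
            simp
          rw [hfil]
          congr 1
          rw [gA_filter L' (fun x => x.1 != c.1 && x.2.1 != c.2.1)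
            (PySem.Set.add md c.1) (PySem.Set.add mr c.2.1) ?hdrop]
          case hdrop =>
            intro x hx hqx
            simp only [Bool.and_eq_false_iff, bne_eq_false_iff_eq] at hqx
            rcases Bool.eq_false_or_eq_true
              (okB (PySem.Set.add md c.1) (PySem.Set.add mr c.2.1) x) with h1 | h1
            swap
            · exact h1
            · exfalso
              rcases (okB_iff _ _ _).mp h1 with ⟨hm1, hm2⟩
              rw [PySem.Set.mem_add] at hm1 hm2
              rcases hqx with hq1 | hq2
              · exact hm1 (Or.inr hq1)
              · exact hm2 (Or.inr hq2)
          apply ih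
          · exact le_trans (L'.length_filter_le _) (Nat.succ_le_succ_iff.mp (by simpa using hn))
          · exact hp'.sublist List.filter_sublist
          · intro x hx
            rcases List.mem_filter.mp hx with ⟨hxL, hq⟩
            simp only [Bool.and_eq_true, bne_iff_ne] at hq
            rcases (okB_iff md mr x).mp (hok x (by simp [hxL])) with ⟨hm1, hm2⟩
            rw [okB_iff, PySem.Set.mem_add, PySem.Set.mem_add]
            exact ⟨fun hor => hor.elim hm1 hq.1, fun hor => hor.elim hm2 hq.2⟩

theorem selGreedy_sorted (n : Nat) (xs : List (Int × Int × Int)) (hn : xs.length ≤ n) :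
    selGreedy (PySem.List.sorted xs (fun x => -x.2.2)) = selGreedy xs := by
  induction n generalizing xs with
  | zero =>
      have hL : xs = [] := List.eq_nil_of_length_eq_zero (Nat.le_zero.mp hn)
      subst hL; rfl
  | succ n ih =>
      rcases hm : PySem.List.max? xs (fun x => x.2.2) with _ | c
      · have hL : xs = [] := (PySem.List.max?_eq_none_iff _ _).mp hm
        subst hL; rfl
      · have hmax2 : PySem.List.max? (PySem.List.sorted xs (fun x => -x.2.2))
            (fun x => x.2.2) = some c := by
          rw [max?_eq_head_sorted, PySem.List.sorted_sorted, ← max?_eq_head_sorted, hm]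
        rw [selGreedy_eq xs, hm, selGreedy_eq (PySem.List.sorted xs (fun x => -x.2.2)), hmax2]
        dsimp only
        congr 1
        rw [filter_sorted]
        apply ih
        have hlt := length_filter_lt_of_mem_neg xs
          (fun x => x.1 != c.1 && x.2.1 != c.2.1) c (PySem.List.max?_mem hm) (by simp)
        omega

-- ===== VERDICT (by name: the statement is the Claim_ definition above) =====
theorem solve_greedy_spec : Claim_equal_solve_greedy := by
  intro scores _hdom _hpre
  unfold Spec_solve_greedy solve_greedy solve_greedy_alt
  rw [foldl_eq_gA, List.nil_append]
  rw [gA_eq_selGreedy (PySem.List.sorted _ (fun x => -x.2.2)).length _ _ _ le_rfl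
    ((PySem.List.sorted_pairwise _ _).imp (by intro a b h; omega))
    (by intro x _; rfl)]
  exact selGreedy_sorted _ _ le_rfl
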